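-- pv_equiv track=rewrite | github.com/miliar/Code_Jam_Webscraper | Solutions_python/Problem_178/3406.py | solve_for
-- ===== SOURCE A (Python) =====
-- def solve_for(case_input):
-- 	final_minus = case_input.rfind('-')
-- 	if final_minus == -1:
-- 		return 0
--
-- 	groups=1
-- 	search_for='+'
-- 	for i in range(final_minus, -1, -1):
-- 		if case_input[i] == search_for:
-- 			if search_for == '+':
-- 				search_for = '-'
-- 			else:
-- 				search_for = '+'
-- 			groups += 1
--
-- 	return groups
-- ===== SOURCE B (Python) =====
-- def solve_for(case_input):
--     last = case_input.rfind('-')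
--     if last == -1:
--         return 0
--     signs = [c for c in case_input[:last + 1] if c == '+' or c == '-']
--     count = 0
--     prev = ''
--     for c in signs:
--         if c != prev:
--             count += 1
--         prev = c
--     return count
-- ===== Notes on version B (the rewrite author's own statement) =====
-- stated objective: simpler
-- what changed: Replaces A's backward index loop with a toggling search-target state machine by a forward pass: truncate at the last minus sign, keep only the sign characters, and count maximal runs by bumping a counter at each change from the previous character.
import Mathlib
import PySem

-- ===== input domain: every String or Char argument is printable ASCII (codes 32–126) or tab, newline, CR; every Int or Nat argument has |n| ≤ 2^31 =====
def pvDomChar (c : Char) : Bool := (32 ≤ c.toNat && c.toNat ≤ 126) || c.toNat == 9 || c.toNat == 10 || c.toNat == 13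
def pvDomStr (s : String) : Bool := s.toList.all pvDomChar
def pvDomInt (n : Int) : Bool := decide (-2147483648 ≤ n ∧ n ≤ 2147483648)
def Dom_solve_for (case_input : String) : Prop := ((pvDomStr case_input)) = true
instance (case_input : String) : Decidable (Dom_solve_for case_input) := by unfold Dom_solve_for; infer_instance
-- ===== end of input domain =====

-- B is simpler: a forward pass counting runs of sign characters in the prefix up to the
-- last '-', instead of A's backward index loop with a toggling 'search_for' state machine.

-- ===== PORT A =====
def solve_for (case_input : String) : Int :=
  let final_minus := PySem.Str.rfind case_input "-"
  if final_minus = -1 then 0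
  else
    ((PySem.List.pyRange final_minus (-1) (-1)).foldl
      (fun (st : Int × Char) i =>
        if PySem.Str.pyGet? case_input i = some st.2 then
          (st.1 + 1, if st.2 = '+' then '-' else '+')
        else st)
      (1, '+')).1

-- ===== PORT B =====
def solve_for_alt (case_input : String) : Int :=
  let last := PySem.Str.rfind case_input "-"
  if last = -1 then 0
  else
    let signs := (PySem.Str.slice case_input none (some (last + 1))).toList.filter
      (fun c => c == '+' || c == '-')
    ((signs.foldl
      (fun (st : Int × Option Char) c =>
        (if some c ≠ st.2 then st.1 + 1 else st.1, some c))
      (0, (none : Option Char)))).1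

-- ===== PRECONDITION & SPEC =====
def Spec_solve_for (case_input : String) (out : Int) : Prop := out = solve_for_alt case_input
instance (case_input : String) (out : Int) : Decidable (Spec_solve_for case_input out) := by unfold Spec_solve_for; infer_instance

-- ===== CLAIM (what is proved, stated in full; the proofs are below) =====
def Claim_equal_solve_for : Prop := ∀ (case_input : String), Dom_solve_for case_input → Spec_solve_for case_input (solve_for case_input)

-- ===== LEMMAS AND PROOFS =====

/-- A's loop body, on characters. -/
def pvStepC (st : Int × Char) (c : Char) : Int × Char :=
  if c = st.2 then (st.1 + 1, if st.2 = '+' then '-' else '+') else st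

/-- B's loop body. -/
def pvStepB (st : Int × Option Char) (c : Char) : Int × Option Char :=
  (if some c ≠ st.2 then st.1 + 1 else st.1, some c)

def pvIsSign (c : Char) : Bool := c == '+' || c == '-'

/-- count of changes in a char list relative to a previous character -/
def pvChg : Option Char → List Char → Int
  | _, [] => 0
  | p, c :: t => (if some c ≠ p then 1 else 0) + pvChg (some c) t

/-- count of adjacent changes -/
def pvAdj : List Char → Int
  | [] => 0
  | c :: t => pvChg (some c) t

/-- a non-(-1) result of rfind.go for the pattern "-" is an in-range index holding '-' -/
lemma pvRfindGo_spec (s : List Char) (k : Nat) (m : Int)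
    (h : PySem.Chars.rfind.go s ['-'] k = m) (hm : m ≠ -1) :
    0 ≤ m ∧ m.toNat < s.length ∧ s[m.toNat]? = some '-' := by
  induction k with
  | zero =>
    rw [PySem.Chars.rfind.go] at h
    split at h
    · rename_i hp
      rw [List.isPrefixOf_iff_prefix] at hp
      rcases hp with ⟨t, ht⟩
      subst h
      refine ⟨le_refl 0, ?_, ?_⟩ <;> simp [← ht]
    · exact absurd h.symm hm
  | succ j ih =>
    rw [PySem.Chars.rfind.go] at h
    split at h
    · rename_i hp
      rw [List.isPrefixOf_iff_prefix] at hp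
      have hh : (s.drop (j+1)).head? = some '-' := by
        rcases hp with ⟨t, ht⟩; rw [← ht]; rfl
      rw [List.head?_drop] at hh
      have hlt : j + 1 < s.length := by
        by_contra hc
        rw [List.getElem?_eq_none (by omega)] at hh
        simp at hh
      subst h
      exact ⟨by positivity, by simpa using hlt, by simpa using hh⟩
    · exact ih h

/-- A's countdown index loop is a fold over the reversed prefix. -/
lemma pvFoldA (s : List Char) (n : Nat) (hn : n ≤ s.length) (init : Int × Char) :
    (PySem.List.pyRange ((n : Int) - 1) (-1) (-1)).foldl
      (fun (st : Int × Char) i =>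
        if PySem.List.pyGet? s i = some st.2 then
          (st.1 + 1, if st.2 = '+' then '-' else '+')
        else st) init
    = (s.take n).reverse.foldl pvStepC init := by
  induction n generalizing init with
  | zero => rw [PySem.List.pyRange_neg_one_eq_nil (by norm_num)]; simp
  | succ k ih =>
    have h1 : ((k + 1 : Nat) : Int) - 1 = (k : Nat) := by push_cast; ring
    rw [h1, PySem.List.pyRange_neg_one_cons (by omega)]
    have hk : k < s.length := by omega
    have hget : PySem.List.pyGet? s ((k : Nat) : Int) = some s[k] :=
      PySem.List.pyGet?_ofNat s k hk
    have htake : (s.take (k + 1)).reverse = s[k] :: (s.take k).reverse := by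
      rw [List.take_add_one]
      simp [List.getElem?_eq_getElem hk]
    rw [htake, List.foldl_cons, List.foldl_cons]
    rw [← ih (by omega) (pvStepC init s[k])]
    congr 1
    simp [hget, pvStepC]

/-- the toggle machine ignores non-sign characters while its target is a sign -/
lemma pvFoldC_filter (l : List Char) (st : Int × Char)
    (hst : st.2 = '+' ∨ st.2 = '-') :
    l.foldl pvStepC st = (l.filter pvIsSign).foldl pvStepC st := by
  induction l generalizing st with
  | nil => rfl
  | cons c t ih =>
    by_cases hc : pvIsSign c
    · rw [List.filter_cons_of_pos hc, List.foldl_cons, List.foldl_cons]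
      apply ih
      unfold pvStepC
      split
      · rcases hst with h | h <;> simp [h]
      · exact hst
    · rw [List.filter_cons_of_neg hc, List.foldl_cons]
      have hne : pvStepC st c = st := by
        unfold pvStepC
        have : c ≠ st.2 := by
          intro h; apply hc; rcases hst with h' | h' <;> simp [pvIsSign, h ▸ h']
        simp [this]
      rw [hne]
      exact ih st hst

/-- on sign-only lists the toggle machine counts changes from the opposite sign -/
lemma pvFoldC_count (v : List Char) (hv : ∀ c ∈ v, pvIsSign c = true)
    (g : Int) (sf : Char) (hsf : sf = '+' ∨ sf = '-') :
    (v.foldl pvStepC (g, sf)).1 = g + pvChg (some (if sf = '+' then '-' else '+')) v := by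
  induction v generalizing g sf with
  | nil => simp [pvChg]
  | cons c t ih =>
    have hc : pvIsSign c := hv c (by simp)
    have hrest : ∀ x ∈ t, pvIsSign x = true := fun x hx => hv x (by simp [hx])
    rw [List.foldl_cons]
    by_cases h : c = sf
    · have hstep : pvStepC (g, sf) c = (g + 1, if sf = '+' then '-' else '+') := by
        simp [pvStepC, h]
      rw [hstep, ih hrest (g+1) _ (by rcases hsf with h' | h' <;> simp [h'])]
      have hne : some sf ≠ some (if sf = '+' then '-' else '+') := by
        rcases hsf with h' | h' <;> simp [h']
      rw [pvChg, h]
      have : (if (if sf = '+' then '-' else '+') = '+' then '-' else '+') = sf := by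
        rcases hsf with h' | h' <;> simp [h']
      rw [this]
      simp [hne]; ring
    · have hstep : pvStepC (g, sf) c = (g, sf) := by simp [pvStepC, h]
      rw [hstep, ih hrest g sf hsf, pvChg]
      have hco : c = (if sf = '+' then '-' else '+') := by
        rcases hsf with h' | h' <;> rcases (by simpa [pvIsSign] using hc : c = '+' ∨ c = '-') with h'' | h'' <;>
          simp_all
      rw [← hco]
      simp

/-- B's counting loop computes the change count -/
lemma pvFoldB_count (v : List Char) (g : Int) (p : Option Char) :
    (v.foldl pvStepB (g, p)).1 = g + pvChg p v := by
  induction v generalizing g p with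
  | nil => simp [pvChg]
  | cons c t ih => simp [pvStepB, pvChg, ih]; split <;> ring

lemma pvChg_append (w : List Char) (p a : Char) :
    pvChg (some p) (w ++ [a]) = pvChg (some p) w + (if a ≠ w.getLastD p then 1 else 0) := by
  induction w generalizing p with
  | nil => simp [pvChg]
  | cons c t ih =>
    rw [List.cons_append, pvChg, pvChg, ih c, List.getLastD_cons]
    ring

/-- the number of adjacent changes is invariant under reversal -/
lemma pvAdj_reverse (v : List Char) : pvAdj v.reverse = pvAdj v := by
  induction v with
  | nil => rfl
  | cons a t ih =>
    cases t with
    | nil => rfl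
    | cons c t' =>
      have hrev : (a :: c :: t').reverse = (c :: t').reverse ++ [a] := by simp
      rw [hrev]
      rcases List.exists_cons_of_ne_nil (by simp : (c :: t').reverse ≠ []) with ⟨h, r, hr⟩
      rw [hr]
      show pvChg (some h) (r ++ [a]) = pvAdj (a :: c :: t')
      rw [pvChg_append]
      have hlast : r.getLastD h = c := by
        have h1 : (h :: r).getLast? = some c := by
          rw [← hr, List.getLast?_reverse]; rfl
        have h2 : r.getLastD h = ((h :: r).getLast?).getD h := by
          rw [← List.getLastD_cons, List.getLastD_eq_getLast?]
        rw [h2, h1]; rfl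
      have h2 : pvChg (some h) r = pvAdj ((c :: t').reverse) := by rw [hr]; rfl
      rw [h2, ih, hlast]
      show pvAdj (c :: t') + _ = pvAdj (a :: c :: t')
      simp only [pvAdj, pvChg]
      simp only [ne_eq, Option.some.injEq, eq_comm (a := a) (b := c)]
      ring

lemma pvChg_none (u : List Char) (hu : u ≠ []) : pvChg none u = 1 + pvAdj u := by
  cases u with
  | nil => exact absurd rfl hu
  | cons c t => simp [pvChg, pvAdj]

-- ===== VERDICT (by name: the statement is the Claim_ definition above) =====
theorem solve_for_spec : Claim_equal_solve_for := by
  intro ci _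
  unfold Spec_solve_for solve_for solve_for_alt
  by_cases hM : PySem.Str.rfind ci "-" = -1
  · have hM' : PySem.Chars.rfind ci.toList ['-'] = -1 := by simpa using hM
    simp [hM']
  · rw [if_neg hM, if_neg hM]
    set s : List Char := ci.toList with hs
    have hgo : PySem.Chars.rfind.go s ['-'] s.length = PySem.Str.rfind ci "-" := by
      rw [PySem.Str.rfind_eq]; rfl
    obtain ⟨h0, hlt, hch⟩ := pvRfindGo_spec s s.length _ hgo hM
    set M : Int := PySem.Str.rfind ci "-" with hMdef
    set n : Nat := M.toNat + 1 with hn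
    have hMn : M = (n : Int) - 1 := by omega
    have hnlen : n ≤ s.length := by omega
    -- A's side
    have hA : ((PySem.List.pyRange M (-1) (-1)).foldl
        (fun (st : Int × Char) i =>
          if PySem.Str.pyGet? ci i = some st.2 then
            (st.1 + 1, if st.2 = '+' then '-' else '+')
          else st) (1, '+')).1
        = ((s.take n).reverse.foldl pvStepC (1, '+')).1 := by
      rw [hMn]
      rw [show (fun (st : Int × Char) i =>
          if PySem.Str.pyGet? ci i = some st.2 then
            (st.1 + 1, if st.2 = '+' then '-' else '+')
          else st) = (fun (st : Int × Char) i =>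
          if PySem.List.pyGet? s i = some st.2 then
            (st.1 + 1, if st.2 = '+' then '-' else '+')
          else st) from by
        funext st i
        rw [PySem.Str.pyGet?_eq, PySem.Chars.pyGet?_eq_listPyGet?, ← hs]]
      rw [pvFoldA s n hnlen]
    rw [hA]
    -- B's side: the slice is the prefix of length n
    have hslice : (PySem.Str.slice ci none (some (M + 1))).toList = s.take n := by
      rw [PySem.Str.toList_slice, PySem.Chars.slice_eq_listSlice, ← hs, PySem.List.slice_to _ (by omega)]
      congr 1
      omega
    rw [hslice]
    -- both sides in terms of pvAdj of the filtered prefix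
    set u : List Char := (s.take n).filter pvIsSign with hu
    have hufilter : (s.take n).filter (fun c => c == '+' || c == '-') = u := rfl
    rw [hufilter]
    have hBfold : ((u.foldl
        (fun (st : Int × Option Char) c =>
          (if some c ≠ st.2 then st.1 + 1 else st.1, some c))
        (0, (none : Option Char)))).1 = 0 + pvChg none u := pvFoldB_count u 0 none
    rw [hBfold]
    -- the prefix ends with '-', so u ends with '-'
    have htake : s.take n = s.take M.toNat ++ ['-'] := by
      rw [hn, List.take_add_one]
      congr 1
      rw [hch]
      rfl
    have huapp : u = (s.take M.toNat).filter pvIsSign ++ ['-'] := by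
      rw [hu, htake, List.filter_append]
      rfl
    have hune : u ≠ [] := by rw [huapp]; simp
    -- A's machine counts 1 + adjacent changes of u
    have hAcount : ((s.take n).reverse.foldl pvStepC (1, '+')).1 = 1 + pvAdj u := by
      rw [pvFoldC_filter _ _ (Or.inl rfl), List.filter_reverse, ← hu]
      rw [pvFoldC_count u.reverse (fun c hc => List.of_mem_filter (List.mem_reverse.mp hc))
        1 '+' (Or.inl rfl)]
      have hurev : u.reverse = '-' :: ((s.take M.toNat).filter pvIsSign).reverse := by
        rw [huapp]; simp
      have : pvChg (some (if '+' = '+' then '-' else '+')) u.reverse = pvAdj u.reverse := by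
        rw [hurev]
        simp only [pvChg, pvAdj]
        simp
      rw [this, pvAdj_reverse]
    rw [hAcount, pvChg_none u hune]
    ring
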